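-- pv_equiv track=rewrite | github.com/Anshul-GH/freelance_projects | category_job_evaluation_tests/bnyMellon/coding_friends.py | minNum
-- ===== SOURCE A (Python) =====
-- def minNum(samDaily, kellyDaily, difference):
--     day_count = 0
--     tot_kelly = 0
--     tot_sam = 0
--
--     # scenario where kelly cannot surpass sam
--     # 1. kelly solves less problems daily than sam
--     # # 2. sam is already behind kelly even after the headstart(difference)
--     if (kellyDaily <= samDaily): # or (samDaily + difference < kellyDaily)
--         day_count = -1
--     # day1
--     elif day_count == 0:
--         tot_sam = samDaily + difference
--         tot_kelly = kellyDaily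
--         # kellyDaily += kellyDaily
--         day_count += 1
--
--     while tot_sam >= tot_kelly:
--         tot_kelly += kellyDaily
--         tot_sam += samDaily
--         day_count += 1
--
--     return day_count
--
--
--
--
--     while kellyDaily < samDaily:
--         kellyDaily += kellyDaily
-- ===== SOURCE B (Python) =====
-- def minNum(samDaily, kellyDaily, difference):
--     if kellyDaily <= samDaily:
--         return -1
--     return max(1, difference // (kellyDaily - samDaily) + 1)
-- ===== Notes on version B (the rewrite author's own statement) =====
-- stated objective: alternative
-- what changed: replaces the day-by-day simulation loop with the closed form max(1, difference // (kellyDaily - samDaily) + 1), and returns -1 directly when kellyDaily <= samDaily (where A's loop never terminates)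
-- outside the precondition, e.g. on minNum(2, 1, 0): A does not finish within the time limit, B returns -1
import Mathlib
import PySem

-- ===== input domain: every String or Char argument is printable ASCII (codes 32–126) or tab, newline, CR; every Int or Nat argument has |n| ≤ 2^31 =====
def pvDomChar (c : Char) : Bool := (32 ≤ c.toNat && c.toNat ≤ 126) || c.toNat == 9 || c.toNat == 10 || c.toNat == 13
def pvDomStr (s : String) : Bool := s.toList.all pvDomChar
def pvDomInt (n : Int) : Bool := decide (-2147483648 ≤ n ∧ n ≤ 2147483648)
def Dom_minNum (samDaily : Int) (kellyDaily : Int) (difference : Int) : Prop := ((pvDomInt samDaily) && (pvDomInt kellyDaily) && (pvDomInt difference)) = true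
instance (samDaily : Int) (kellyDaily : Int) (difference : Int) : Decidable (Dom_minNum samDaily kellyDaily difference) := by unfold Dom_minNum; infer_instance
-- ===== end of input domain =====

-- B replaces A's day-by-day simulation loop with the closed form
-- max(1, difference // (kellyDaily - samDaily) + 1)  (-1 when kellyDaily <= samDaily).


-- ===== PORT A =====
-- the 'while tot_sam >= tot_kelly' loop; the inner 'samDaily < kellyDaily' guard only
-- makes the recursion total (in Python the loop never terminates when kellyDaily <= samDaily,
-- which Pre_minNum excludes)
def minNumLoop (samDaily : Int) (kellyDaily : Int) (tot_sam : Int) (tot_kelly : Int) (day_count : Int) : Int :=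
  if _h : tot_sam ≥ tot_kelly then
    if _hd : samDaily < kellyDaily then
      minNumLoop samDaily kellyDaily (tot_sam + samDaily) (tot_kelly + kellyDaily) (day_count + 1)
    else day_count
  else day_count
termination_by (tot_sam - tot_kelly + 1).toNat
decreasing_by omega

def minNum (samDaily : Int) (kellyDaily : Int) (difference : Int) : Int :=
  if kellyDaily ≤ samDaily then
    minNumLoop samDaily kellyDaily 0 0 (-1)
  else
    minNumLoop samDaily kellyDaily (samDaily + difference) kellyDaily 1

-- ===== PORT B =====
def minNum_alt (samDaily : Int) (kellyDaily : Int) (difference : Int) : Int :=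
  if kellyDaily ≤ samDaily then -1
  else max 1 (PySem.Int.floordiv difference (kellyDaily - samDaily) + 1)

-- ===== PRECONDITION & SPEC =====
-- Pre_ excludes kellyDaily ≤ samDaily: there Python A's while loop never terminates
-- (tot_sam - tot_kelly never decreases), so A diverges; B returns -1.
def Pre_minNum (samDaily : Int) (kellyDaily : Int) (difference : Int) : Prop :=
  samDaily < kellyDaily
instance (samDaily : Int) (kellyDaily : Int) (difference : Int) : Decidable (Pre_minNum samDaily kellyDaily difference) := by unfold Pre_minNum; infer_instance
def pvWitness_minNum : Int × Int × Int := (1, 3, 5)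
def Spec_minNum (samDaily : Int) (kellyDaily : Int) (difference : Int) (out : Int) : Prop := out = minNum_alt samDaily kellyDaily difference
instance (samDaily : Int) (kellyDaily : Int) (difference : Int) (out : Int) : Decidable (Spec_minNum samDaily kellyDaily difference out) := by unfold Spec_minNum; infer_instance

-- ===== CLAIM (what is proved, stated in full; the proofs are below) =====
def Claim_equal_minNum : Prop := ∀ (samDaily : Int) (kellyDaily : Int) (difference : Int), Dom_minNum samDaily kellyDaily difference → Pre_minNum samDaily kellyDaily difference → Spec_minNum samDaily kellyDaily difference (minNum samDaily kellyDaily difference)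

-- ===== LEMMAS AND PROOFS =====

-- The loop adds day_count + (number of iterations) = day_count + max 0 ((tot_sam-tot_kelly) fdiv d + 1)
theorem minNumLoop_closed (samDaily kellyDaily : Int) (hd : samDaily < kellyDaily)
    (tot_sam tot_kelly day_count : Int) :
    minNumLoop samDaily kellyDaily tot_sam tot_kelly day_count
      = day_count + max 0 (PySem.Int.floordiv (tot_sam - tot_kelly) (kellyDaily - samDaily) + 1) := by
  rw [PySem.Int.floordiv_eq_ediv_of_pos (by omega)]
  by_cases h : tot_sam ≥ tot_kelly
  · rw [minNumLoop, dif_pos h, dif_pos hd,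
      minNumLoop_closed samDaily kellyDaily hd,
      PySem.Int.floordiv_eq_ediv_of_pos (by omega)]
    have hx : tot_sam + samDaily - (tot_kelly + kellyDaily)
        = (tot_sam - tot_kelly) + (-1) * (kellyDaily - samDaily) := by ring
    rw [hx, Int.add_mul_ediv_right _ _ (by omega : kellyDaily - samDaily ≠ 0)]
    have h0 : 0 ≤ (tot_sam - tot_kelly) / (kellyDaily - samDaily) :=
      Int.ediv_nonneg (by omega) (by omega)
    omega
  · rw [minNumLoop, dif_neg h]
    have hneg : ¬ (0 ≤ (tot_sam - tot_kelly) / (kellyDaily - samDaily)) := by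
      rw [Int.le_ediv_iff_mul_le (by omega : (0:Int) < kellyDaily - samDaily)]
      omega
    omega
termination_by (tot_sam - tot_kelly + 1).toNat
decreasing_by omega

-- ===== VERDICT (by name: the statement is the Claim_ definition above) =====
theorem minNum_spec : Claim_equal_minNum := by
  intro samDaily kellyDaily difference _hdom hpre
  replace hpre : samDaily < kellyDaily := hpre
  unfold Spec_minNum minNum minNum_alt
  rw [if_neg (by omega : ¬ kellyDaily ≤ samDaily), if_neg (by omega : ¬ kellyDaily ≤ samDaily),
    minNumLoop_closed samDaily kellyDaily hpre]
  have hx : samDaily + difference - kellyDaily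
      = difference + (-1) * (kellyDaily - samDaily) := by ring
  rw [PySem.Int.floordiv_eq_ediv_of_pos (by omega), PySem.Int.floordiv_eq_ediv_of_pos (by omega),
    hx, Int.add_mul_ediv_right _ _ (by omega : kellyDaily - samDaily ≠ 0)]
  omega
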